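-- pv_equiv track=rewrite | github.com/ttcandy/script-code | Python/手机号码随机生成1.0.py | Manufacturer
-- ===== SOURCE A (Python) =====
-- phone_them_roughly={
--     "中国电信":[ '133','149','153','173','177','180','181','189','190','191','193','199' ],
--     "中国联通":[ '130','131','132','145','146','155','156','166','171','175','176','185','186','196' ],
--     "中国移动":[ ['134',list(range(0,9))],'135','136','137','138','139','147','148','150','151','152','157','158','159','172','178','182','183','184','187','188','195','197','198' ],
--     "中国广电":[ '192' ],
--     "网卡专属":[ '145','147' ],
--     "物联网业务":[ '146','148' ],
--     "卫星通信":'1349',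
--     "虚拟运营商-电信":[ '1700','1701','1702','162' ],
--     "虚拟运营商-移动":[ '1703','1705','1706' ,'165' ],
--     "虚拟运营商-联通":[ '1704','1707','1708','1709','167','171' ],
-- }
--
-- def Manufacturer(phone):
--     '''
--     判断手机号码运营商
--     :return: key
--     '''
--     phone=str(phone)
--     for key in phone_them_roughly:
--         for head in phone_them_roughly[key]:
--             if phone == head:
--                 return key
--             else:
--                 for i in head:
--                     if phone == i:
--                         return  key
-- ===== SOURCE B (Python) =====
-- # B: one-time index build with setdefault (first occurrence in A's scan order wins), then a single dict lookup.
-- phone_them_roughly={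
--     "中国电信":[ '133','149','153','173','177','180','181','189','190','191','193','199' ],
--     "中国联通":[ '130','131','132','145','146','155','156','166','171','175','176','185','186','196' ],
--     "中国移动":[ ['134',list(range(0,9))],'135','136','137','138','139','147','148','150','151','152','157','158','159','172','178','182','183','184','187','188','195','197','198' ],
--     "中国广电":[ '192' ],
--     "网卡专属":[ '145','147' ],
--     "物联网业务":[ '146','148' ],
--     "卫星通信":'1349',
--     "虚拟运营商-电信":[ '1700','1701','1702','162' ],
--     "虚拟运营商-移动":[ '1703','1705','1706' ,'165' ],
--     "虚拟运营商-联通":[ '1704','1707','1708','1709','167','171' ],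
-- }
--
-- def _build_index():
--     idx = {}
--     for key, heads in phone_them_roughly.items():
--         for head in heads:
--             if isinstance(head, str):
--                 idx.setdefault(head, key)
--                 for ch in head:
--                     idx.setdefault(ch, key)
--             else:  # a list head: only its string elements can ever equal a phone string
--                 for el in head:
--                     if isinstance(el, str):
--                         idx.setdefault(el, key)
--     return idx
--
-- _INDEX = _build_index()
--
-- def Manufacturer(phone):
--     '''
--     判断手机号码运营商
--     :return: key
--     '''
--     return _INDEX.get(str(phone))
-- ===== Notes on version B (the rewrite author's own statement) =====
-- stated objective: alternative
-- what changed: Replaces A's per-call nested scan over the carrier tables (keys, heads, characters/elements) with a module-level index dict built once via setdefault (first occurrence in A's scan order wins) so each call is a single dict lookup; per-call work drops from a table scan to one lookup, though the table is too small for a timing run to measure it.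
import Mathlib
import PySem

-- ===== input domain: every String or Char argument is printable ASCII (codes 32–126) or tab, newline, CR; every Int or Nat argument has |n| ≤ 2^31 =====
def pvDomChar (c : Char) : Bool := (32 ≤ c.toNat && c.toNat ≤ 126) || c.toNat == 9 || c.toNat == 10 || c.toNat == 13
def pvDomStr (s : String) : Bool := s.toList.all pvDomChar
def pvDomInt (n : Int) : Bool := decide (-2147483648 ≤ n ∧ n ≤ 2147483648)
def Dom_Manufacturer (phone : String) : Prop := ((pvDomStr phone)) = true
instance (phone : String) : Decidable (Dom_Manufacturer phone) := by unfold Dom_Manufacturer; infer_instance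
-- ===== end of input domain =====

-- B replaces A's per-call nested scan of the prefix tables by a one-time setdefault-built index dict
-- (first occurrence in A's scan order wins) plus a single lookup per call; objective: alternative decomposition.

-- Heterogeneous entries of the Python table:
-- an element of a list-valued head is a string or a list of ints (the latter never equals a phone string)
inductive PElem
  | s (v : String)
  | il (v : List Int)
deriving DecidableEq, Repr

-- a head is a string or a list of elements
inductive PHead
  | s (v : String)
  | lst (v : List PElem)
deriving DecidableEq, Repr

-- a dict value is a string (iterated as characters) or a list of heads
inductive PVal
  | s (v : String)
  | lst (v : List PHead)
deriving DecidableEq, Repr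

def phoneThemRoughly : List (String × PVal) := [
  ("中国电信", .lst [.s "133", .s "149", .s "153", .s "173", .s "177", .s "180", .s "181", .s "189", .s "190", .s "191", .s "193", .s "199"]),
  ("中国联通", .lst [.s "130", .s "131", .s "132", .s "145", .s "146", .s "155", .s "156", .s "166", .s "171", .s "175", .s "176", .s "185", .s "186", .s "196"]),
  ("中国移动", .lst [.lst [.s "134", .il [0,1,2,3,4,5,6,7,8]], .s "135", .s "136", .s "137", .s "138", .s "139", .s "147", .s "148", .s "150", .s "151", .s "152", .s "157", .s "158", .s "159", .s "172", .s "178", .s "182", .s "183", .s "184", .s "187", .s "188", .s "195", .s "197", .s "198"]),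
  ("中国广电", .lst [.s "192"]),
  ("网卡专属", .lst [.s "145", .s "147"]),
  ("物联网业务", .lst [.s "146", .s "148"]),
  ("卫星通信", .s "1349"),
  ("虚拟运营商-电信", .lst [.s "1700", .s "1701", .s "1702", .s "162"]),
  ("虚拟运营商-移动", .lst [.s "1703", .s "1705", .s "1706", .s "165"]),
  ("虚拟运营商-联通", .lst [.s "1704", .s "1707", .s "1708", .s "1709", .s "167", .s "171"])]

-- iterating a Python dict value: a string yields its characters (as length-1 strings), a list its heads
def valHeads : PVal → List PHead
  | .s v => v.toList.map (fun c => PHead.s (String.mk [c]))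
  | .lst hs => hs

-- ===== PORT A =====
-- inner loop 'for i in head' over a string head: i ranges over the characters
def aTryChars (phone key : String) : List Char → Option String
  | [] => none
  | c :: rest => if phone = String.mk [c] then some key else aTryChars phone key rest

-- inner loop 'for i in head' over a list head: 'phone == i' is False for the int-list element
def aTryElems (phone key : String) : List PElem → Option String
  | [] => none
  | .s v :: rest => if phone = v then some key else aTryElems phone key rest
  | .il _ :: rest => aTryElems phone key rest

-- body of 'for head in …': 'phone == head' (False when head is a list), else scan head's items
def aTryHead (phone key : String) : PHead → Option String
  | .s v => if phone = v then some key else aTryChars phone key v.toList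
  | .lst es => aTryElems phone key es

def aTryHeads (phone key : String) : List PHead → Option String
  | [] => none
  | h :: rest =>
    match aTryHead phone key h with
    | some k => some k
    | none => aTryHeads phone key rest

def aLoop (phone : String) : List (String × PVal) → Option String
  | [] => none
  | (key, v) :: rest =>
    match aTryHeads phone key (valHeads v) with
    | some k => some k
    | none => aLoop phone rest

def Manufacturer (phone : String) : Option String :=
  aLoop phone phoneThemRoughly

-- ===== PORT B =====
-- _build_index: idx.setdefault for the head and each of its characters / string elements
def bAddChars (key : String) (idx : PySem.Dict String String) : List Char → PySem.Dict String String
  | [] => idx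
  | c :: rest => bAddChars key (idx.setdefault (String.mk [c]) key) rest

def bAddElems (key : String) (idx : PySem.Dict String String) : List PElem → PySem.Dict String String
  | [] => idx
  | .s v :: rest => bAddElems key (idx.setdefault v key) rest
  | .il _ :: rest => bAddElems key idx rest

def bAddHead (key : String) (idx : PySem.Dict String String) : PHead → PySem.Dict String String
  | .s v => bAddChars key (idx.setdefault v key) v.toList
  | .lst es => bAddElems key idx es

def bAddHeads (key : String) (idx : PySem.Dict String String) : List PHead → PySem.Dict String String
  | [] => idx
  | h :: rest => bAddHeads key (bAddHead key idx h) rest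

def bBuild (idx : PySem.Dict String String) : List (String × PVal) → PySem.Dict String String
  | [] => idx
  | (key, v) :: rest => bBuild (bAddHeads key idx (valHeads v)) rest

def pvIndex : PySem.Dict String String := bBuild PySem.Dict.empty phoneThemRoughly

def Manufacturer_alt (phone : String) : Option String :=
  pvIndex.get? phone

-- ===== PRECONDITION & SPEC =====
def Spec_Manufacturer (phone : String) (out : Option String) : Prop := out = Manufacturer_alt phone
instance (phone : String) (out : Option String) : Decidable (Spec_Manufacturer phone out) := by unfold Spec_Manufacturer; infer_instance

-- ===== CLAIM (what is proved, stated in full; the proofs are below) =====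
def Claim_equal_Manufacturer : Prop := ∀ (phone : String), Dom_Manufacturer phone → Spec_Manufacturer phone (Manufacturer phone)

-- ===== LEMMAS AND PROOFS =====

theorem bAddChars_get? (key p : String) (idx : PySem.Dict String String) (l : List Char) :
    (bAddChars key idx l).get? p = ((idx.get? p).orElse (fun _ => aTryChars p key l)) := by
  induction l generalizing idx with
  | nil => cases h : idx.get? p <;> simp [bAddChars, aTryChars, h, Option.orElse]
  | cons c rest ih =>
    simp only [bAddChars, aTryChars, ih]
    by_cases hp : p = String.mk [c]
    · rw [hp, PySem.Dict.get?_setdefault_self]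
      cases h : idx.get? (String.mk [c]) <;> simp [h, Option.orElse]
    · rw [PySem.Dict.get?_setdefault_of_ne _ _ hp]
      cases h : idx.get? p <;> simp [h, Option.orElse, hp]

theorem bAddElems_get? (key p : String) (idx : PySem.Dict String String) (l : List PElem) :
    (bAddElems key idx l).get? p = ((idx.get? p).orElse (fun _ => aTryElems p key l)) := by
  induction l generalizing idx with
  | nil => cases h : idx.get? p <;> simp [bAddElems, aTryElems, h, Option.orElse]
  | cons e rest ih =>
    cases e with
    | s v =>
      simp only [bAddElems, aTryElems, ih]
      by_cases hp : p = v
      · subst hp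
        rw [PySem.Dict.get?_setdefault_self]
        cases h : idx.get? p <;> simp [Option.orElse]
      · rw [PySem.Dict.get?_setdefault_of_ne _ _ hp]
        cases h : idx.get? p <;> simp [Option.orElse, hp]
    | il v => simp only [bAddElems, aTryElems, ih]

theorem bAddHead_get? (key p : String) (idx : PySem.Dict String String) (h : PHead) :
    (bAddHead key idx h).get? p = ((idx.get? p).orElse (fun _ => aTryHead p key h)) := by
  cases h with
  | s v =>
    simp only [bAddHead, aTryHead, bAddChars_get?]
    by_cases hp : p = v
    · subst hp
      rw [PySem.Dict.get?_setdefault_self]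
      cases hh : idx.get? p <;> simp [Option.orElse]
    · rw [PySem.Dict.get?_setdefault_of_ne _ _ hp]
      cases hh : idx.get? p <;> simp [Option.orElse, hp]
  | lst es => simp only [bAddHead, aTryHead, bAddElems_get?]

theorem bAddHeads_get? (key p : String) (idx : PySem.Dict String String) (hs : List PHead) :
    (bAddHeads key idx hs).get? p = ((idx.get? p).orElse (fun _ => aTryHeads p key hs)) := by
  induction hs generalizing idx with
  | nil => cases h : idx.get? p <;> simp [bAddHeads, aTryHeads, h, Option.orElse]
  | cons h rest ih =>
    simp only [bAddHeads, aTryHeads, ih, bAddHead_get?]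
    cases hh : idx.get? p with
    | some k => simp [Option.orElse]
    | none =>
      cases aTryHead p key h <;> simp [Option.orElse]

theorem bBuild_get? (p : String) (idx : PySem.Dict String String) (ts : List (String × PVal)) :
    (bBuild idx ts).get? p = ((idx.get? p).orElse (fun _ => aLoop p ts)) := by
  induction ts generalizing idx with
  | nil => cases h : idx.get? p <;> simp [bBuild, aLoop, h, Option.orElse]
  | cons t rest ih =>
    obtain ⟨key, v⟩ := t
    simp only [bBuild, aLoop, ih, bAddHeads_get?]
    cases hh : idx.get? p with
    | some k => simp [Option.orElse]
    | none =>
      cases aTryHeads p key (valHeads v) <;> simp [Option.orElse]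

-- ===== VERDICT (by name: the statement is the Claim_ definition above) =====
theorem Manufacturer_spec : Claim_equal_Manufacturer := by
  intro phone _
  unfold Spec_Manufacturer Manufacturer Manufacturer_alt pvIndex
  rw [bBuild_get?]
  simp [Option.orElse, PySem.Dict.get?_empty]
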